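-- pv_equiv track=rewrite | github.com/nnaX000/Baekjoon_Programmers | 프로그래머스/2/169199. 리코쳇 로봇/리코쳇 로봇.py | solution
-- ===== SOURCE A (Python) =====
-- from collections import deque
--
-- def solution(board):
--     x_len = len(board)
--     y_len = len(board[0])
--     dequee = deque()
--
--     r_x = 0
--     r_y = 0
--
--     dx = [-1,1,0,0]
--     dy = [0,0,-1,1]
--
--     visited=set()
--
--     for i in range(x_len):
--         for j in range(y_len):
--             if(board[i][j] == "R"):
--                 r_x = i
--                 r_y = j
--
--     dequee.append((r_x,r_y,0))
--     visited.add((r_x,r_y))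
--
--     while(dequee):
--         x,y,cost = dequee.popleft()
--
--         if(board[x][y] == "G"):
--             return cost
--
--         for i in range(4):
--             nx = x
--             ny = y
--
--             while(True):
--                 tx = nx + dx[i]
--                 ty = ny + dy[i]
--
--                 if 0 <= tx < x_len and 0 <= ty < y_len and board[tx][ty] != 'D':
--                     nx, ny = tx, ty
--                 else:
--                     break
--
--             if((nx,ny) not in visited):
--                 visited.add((nx,ny))
--                 dequee.append((nx,ny,cost+1))
--
--     return -1
-- ===== SOURCE B (Python) =====
-- def solution(board):
--     n, m = len(board), len(board[0])
--
--     def slide(x, y, dx, dy):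
--         while 0 <= x + dx < n and 0 <= y + dy < m and board[x + dx][y + dy] != 'D':
--             x, y = x + dx, y + dy
--         return (x, y)
--
--     sx = sy = 0
--     for i in range(n):
--         for j in range(m):
--             if board[i][j] == 'R':
--                 sx, sy = i, j
--
--     # naive fixed-point iteration: `reach` is the set of cells reachable in
--     # at most `depth` slides; no queue, no frontier, no separate visited set.
--     reach = {(sx, sy)}
--     for depth in range(n * m + 1):
--         if any(board[x][y] == 'G' for x, y in reach):
--             return depth
--         before = len(reach)
--         for x, y in list(reach):
--             reach.add(slide(x, y, -1, 0))
--             reach.add(slide(x, y, 1, 0))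
--             reach.add(slide(x, y, 0, -1))
--             reach.add(slide(x, y, 0, 1))
--         if len(reach) == before:
--             return -1
--     return -1
-- ===== Notes on version B (the rewrite author's own statement) =====
-- stated objective: alternative
-- what changed: Replaces the BFS queue/visited machinery by a naive fixed-point iteration: one cumulative reachable set is re-expanded whole each round (returning -1 as soon as the set stops growing), and the answer is the first round whose set contains a G cell; it trades the queue's per-node processing for repeated whole-set image computation.
import Mathlib
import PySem

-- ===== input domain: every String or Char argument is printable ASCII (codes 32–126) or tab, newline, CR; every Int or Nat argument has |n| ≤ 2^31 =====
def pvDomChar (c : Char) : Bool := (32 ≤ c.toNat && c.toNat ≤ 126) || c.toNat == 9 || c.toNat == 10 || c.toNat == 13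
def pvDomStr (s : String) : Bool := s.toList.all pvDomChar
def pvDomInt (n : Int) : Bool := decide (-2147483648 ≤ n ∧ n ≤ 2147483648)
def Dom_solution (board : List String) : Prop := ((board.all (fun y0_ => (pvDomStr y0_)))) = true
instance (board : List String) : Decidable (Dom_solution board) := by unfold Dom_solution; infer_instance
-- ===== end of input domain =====

-- B replaces A's BFS queue/visited machinery by a naive fixed-point iteration on one cumulative
-- reachable set (re-expanded whole each round; the answer is the first round containing a G cell);
-- objective: alternative algorithm, not claimed faster.

-- ===== PORT A =====

-- board[x][y]; indices are nonnegative and in range on every access A performs on Pre_ inputs,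
-- so the total getD access is exact there.
def cellA (board : List String) (x y : Int) : Char :=
  (board.getD x.toNat "").toList.getD y.toNat ' '

-- the inner `while True` slide; fuel (x_len+y_len) bounds the number of one-cell moves, which
-- Python's loop never exceeds from an in-range start, so the port is exact on Pre_ inputs
def slideA (xlen ylen : Int) (board : List String) (dxi dyi : Int) : Nat → Int → Int → Int × Int
  | 0, nx, ny => (nx, ny)
  | f + 1, nx, ny =>
    let tx := nx + dxi
    let ty := ny + dyi
    if 0 ≤ tx ∧ tx < xlen ∧ 0 ≤ ty ∧ ty < ylen ∧ cellA board tx ty ≠ 'D' then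
      slideA xlen ylen board dxi dyi f tx ty
    else (nx, ny)

-- `for i in range(4): … dequee.append(…)` — appends the new triples onto the queue q
def expandA (xlen ylen : Int) (board : List String) (x y cost : Int) :
    List Nat → List (Int × Int × Int) → PySem.Set (Int × Int) →
    List (Int × Int × Int) × PySem.Set (Int × Int)
  | [], q, vis => (q, vis)
  | i :: is, q, vis =>
    let dxi := [(-1 : Int), 1, 0, 0].getD i 0
    let dyi := [(0 : Int), 0, -1, 1].getD i 0
    let p := slideA xlen ylen board dxi dyi (xlen + ylen).toNat x y
    if PySem.Set.contains vis p then expandA xlen ylen board x y cost is q vis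
    else expandA xlen ylen board x y cost is (q ++ [(p.1, p.2, cost + 1)]) (PySem.Set.add vis p)

-- `while dequee:` — fuel x_len*y_len+1 bounds the number of pops (each pop was enqueued, and
-- each enqueue marks a new in-range cell visited), so Python's loop never runs longer on Pre_ inputs
def aLoop (xlen ylen : Int) (board : List String) :
    Nat → List (Int × Int × Int) → PySem.Set (Int × Int) → Int
  | 0, _, _ => -1
  | _ + 1, [], _ => -1
  | f + 1, (x, y, cost) :: rest, vis =>
    if cellA board x y = 'G' then cost
    else
      let r := expandA xlen ylen board x y cost [0, 1, 2, 3] rest vis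
      aLoop xlen ylen board f r.1 r.2

def solution (board : List String) : Int :=
  let xlen : Int := board.length
  let ylen : Int := (board.headD "").length
  -- the double scan for 'R'; later hits overwrite earlier ones
  let start := (List.range board.length).foldl (fun r i =>
      (List.range (board.headD "").length).foldl (fun r j =>
        if (board.getD i "").toList.getD j ' ' = 'R' then ((i : Int), (j : Int)) else r) r)
      ((0 : Int), (0 : Int))
  aLoop xlen ylen board (board.length * (board.headD "").length + 1)
    [(start.1, start.2, 0)] (PySem.Set.add PySem.Set.empty start)

-- ===== PORT B =====

def cellB (board : List String) (x y : Int) : Char :=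
  (board.getD x.toNat "").toList.getD y.toNat ' '

-- `while 0 <= x+dx < n and …: x, y = x+dx, y+dy`; same fuel remark as slideA
def slideB (xlen ylen : Int) (board : List String) (dxi dyi : Int) : Nat → Int → Int → Int × Int
  | 0, nx, ny => (nx, ny)
  | f + 1, nx, ny =>
    if 0 ≤ nx + dxi ∧ nx + dxi < xlen ∧ 0 ≤ ny + dyi ∧ ny + dyi < ylen ∧
        cellB board (nx + dxi) (ny + dyi) ≠ 'D' then
      slideB xlen ylen board dxi dyi f (nx + dxi) (ny + dyi)
    else (nx, ny)

-- `for x, y in list(reach): reach.add(slide(…)) ×4` — one whole-set expansion round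
def stepB (xlen ylen : Int) (board : List String) (reach : PySem.Set (Int × Int)) :
    PySem.Set (Int × Int) :=
  reach.foldl (fun s p =>
    PySem.Set.add (PySem.Set.add (PySem.Set.add (PySem.Set.add s
        (slideB xlen ylen board (-1) 0 (xlen + ylen).toNat p.1 p.2))
        (slideB xlen ylen board 1 0 (xlen + ylen).toNat p.1 p.2))
        (slideB xlen ylen board 0 (-1) (xlen + ylen).toNat p.1 p.2))
        (slideB xlen ylen board 0 1 (xlen + ylen).toNat p.1 p.2)) reach

-- `for depth in range(n*m+1): if any(…'G'…): return depth; <expand>; if len(reach)==before: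
-- return -1` — fuel is the literal range length n*m+1; the set's iteration order is consumed
-- only by any() and set adds
def bLoop (xlen ylen : Int) (board : List String) :
    Nat → Int → PySem.Set (Int × Int) → Int
  | 0, _, _ => -1
  | k + 1, depth, reach =>
    if reach.any (fun p => decide (cellB board p.1 p.2 = 'G')) then depth
    else
      let r := stepB xlen ylen board reach
      if r.length = reach.length then -1
      else bLoop xlen ylen board k (depth + 1) r

def solution_alt (board : List String) : Int :=
  let xlen : Int := board.length
  let ylen : Int := (board.headD "").length
  -- the same overwriting double scan for 'R' as in A's source
  let start := (List.range board.length).foldl (fun r i =>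
      (List.range (board.headD "").length).foldl (fun r j =>
        if (board.getD i "").toList.getD j ' ' = 'R' then ((i : Int), (j : Int)) else r) r)
      ((0 : Int), (0 : Int))
  bLoop xlen ylen board (board.length * (board.headD "").length + 1) 0
    (PySem.Set.add PySem.Set.empty start)

-- ===== PRECONDITION & SPEC =====
-- Pre_ excludes exactly the inputs where the Python A raises IndexError: the empty board,
-- a first row of length 0, or some row shorter than the first row (the R-scan touches every
-- column index below len(board[0]) in every row).
def Pre_solution (board : List String) : Prop :=
  board ≠ [] ∧ 1 ≤ (board.headD "").length ∧
    ∀ s ∈ board, (board.headD "").length ≤ s.length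

instance (board : List String) : Decidable (Pre_solution board) := by
  unfold Pre_solution; infer_instance

def pvWitness_solution : List String := (["RG"])

def Spec_solution (board : List String) (out : Int) : Prop := out = solution_alt board
instance (board : List String) (out : Int) : Decidable (Spec_solution board out) := by
  unfold Spec_solution; infer_instance

-- ===== CLAIM (what is proved, stated in full; the proofs are below) =====
def Claim_equal_solution : Prop :=
  ∀ (board : List String), Dom_solution board → Pre_solution board →
    Spec_solution board (solution board)

-- ===== LEMMAS AND PROOFS =====

lemma cell_eq : cellB = cellA := rfl

lemma slide_eq (xlen ylen : Int) (board : List String) (dxi dyi : Int) :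
    ∀ (f : Nat) (nx ny : Int),
      slideB xlen ylen board dxi dyi f nx ny = slideA xlen ylen board dxi dyi f nx ny := by
  intro f
  induction f with
  | zero => intro nx ny; rfl
  | succ f ih => intro nx ny; simp only [slideA, slideB, cell_eq]; split <;> simp [ih]

-- proof-side: the per-pop, per-node expansion of one frontier node (dirs given as pairs)
def expandP (xlen ylen : Int) (board : List String) (x y : Int) :
    List (Int × Int) → List (Int × Int) → PySem.Set (Int × Int) →
    List (Int × Int) × PySem.Set (Int × Int)
  | [], nxt, vis => (nxt, vis)
  | d :: ds, nxt, vis =>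
    let p := slideB xlen ylen board d.1 d.2 (xlen + ylen).toNat x y
    if PySem.Set.contains vis p then expandP xlen ylen board x y ds nxt vis
    else expandP xlen ylen board x y ds (nxt ++ [p]) (PySem.Set.add vis p)

-- proof-side: A's queue loop reorganised as frontier/next-level lists with per-pop fuel
def pLoop (xlen ylen : Int) (board : List String) :
    Nat → List (Int × Int) → List (Int × Int) → Int → PySem.Set (Int × Int) → Int
  | 0, _, _, _, _ => -1
  | _ + 1, [], [], _, _ => -1
  | f + 1, [], (x, y) :: rest, depth, vis =>
    if cellB board x y = 'G' then depth + 1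
    else
      let r := expandP xlen ylen board x y [(-1, 0), (1, 0), (0, -1), (0, 1)] [] vis
      pLoop xlen ylen board f rest r.1 (depth + 1) r.2
  | f + 1, (x, y) :: rest, nxt, depth, vis =>
    if cellB board x y = 'G' then depth
    else
      let r := expandP xlen ylen board x y [(-1, 0), (1, 0), (0, -1), (0, 1)] nxt vis
      pLoop xlen ylen board f rest r.1 depth r.2

lemma expandP_acc (xlen ylen : Int) (board : List String) (x y : Int) :
    ∀ (ds : List (Int × Int)) (nxt : List (Int × Int)) (vis : PySem.Set (Int × Int)),
      expandP xlen ylen board x y ds nxt vis =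
        (nxt ++ (expandP xlen ylen board x y ds [] vis).1,
         (expandP xlen ylen board x y ds [] vis).2) := by
  intro ds
  induction ds with
  | nil => intro nxt vis; simp [expandP]
  | cons d ds ih =>
    intro nxt vis
    simp only [expandP]
    split
    · exact ih nxt vis
    · rw [ih (nxt ++ _), ih ([] ++ _)]
      simp

lemma expand_gen (xlen ylen : Int) (board : List String) (x y c : Int) :
    ∀ (is : List Nat) (q : List (Int × Int × Int)) (vis : PySem.Set (Int × Int)),
      expandA xlen ylen board x y c is q vis =
        (q ++ ((expandP xlen ylen board x y
            (is.map (fun i => ([(-1 : Int), 1, 0, 0].getD i 0, [(0 : Int), 0, -1, 1].getD i 0)))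
            [] vis).1.map (fun p => (p.1, p.2, c + 1))),
         (expandP xlen ylen board x y
            (is.map (fun i => ([(-1 : Int), 1, 0, 0].getD i 0, [(0 : Int), 0, -1, 1].getD i 0)))
            [] vis).2) := by
  intro is
  induction is with
  | nil => intro q vis; simp [expandA, expandP]
  | cons i is ih =>
    intro q vis
    simp only [expandA, expandP, List.map_cons, slide_eq]
    split
    · exact ih q vis
    · rw [ih (q ++ _)]
      rw [expandP_acc xlen ylen board x y _ ([] ++ [_])]
      simp

lemma dirs_eq :
    [0, 1, 2, 3].map (fun i : Nat =>
        ([(-1 : Int), 1, 0, 0].getD i 0, [(0 : Int), 0, -1, 1].getD i 0)) =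
      ([(-1, 0), (1, 0), (0, -1), (0, 1)] : List (Int × Int)) := rfl

lemma loop_eq (xlen ylen : Int) (board : List String) :
    ∀ (f : Nat) (frontier nxt : List (Int × Int)) (depth : Int) (vis : PySem.Set (Int × Int)),
      aLoop xlen ylen board f
        (frontier.map (fun p => (p.1, p.2, depth)) ++ nxt.map (fun p => (p.1, p.2, depth + 1))) vis
      = pLoop xlen ylen board f frontier nxt depth vis := by
  intro f
  induction f with
  | zero => intro frontier nxt depth vis; rfl
  | succ f ih =>
    intro frontier nxt depth vis
    cases frontier with
    | nil =>
      cases nxt with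
      | nil => rfl
      | cons p rest =>
        obtain ⟨x, y⟩ := p
        simp only [List.map_nil, List.nil_append, List.map_cons, aLoop, pLoop, cell_eq]
        split
        · rfl
        · rw [expand_gen, dirs_eq]
          dsimp only
          exact ih rest ((expandP xlen ylen board x y
              [(-1, 0), (1, 0), (0, -1), (0, 1)] [] vis).1) (depth + 1)
              ((expandP xlen ylen board x y [(-1, 0), (1, 0), (0, -1), (0, 1)] [] vis).2)
    | cons p rest =>
      obtain ⟨x, y⟩ := p
      simp only [List.map_cons, List.cons_append, aLoop, pLoop, cell_eq]
      split
      · rfl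
      · rw [expand_gen, dirs_eq,
          expandP_acc xlen ylen board x y [(-1, 0), (1, 0), (0, -1), (0, 1)] nxt vis]
        dsimp only
        have h2 := ih rest (nxt ++ (expandP xlen ylen board x y
            [(-1, 0), (1, 0), (0, -1), (0, 1)] [] vis).1) depth
            ((expandP xlen ylen board x y [(-1, 0), (1, 0), (0, -1), (0, 1)] [] vis).2)
        simp only [List.map_append, List.append_assoc] at h2 ⊢
        exact h2

-- ---------- abstract pieces for the set-level simulation ----------

def dirs4 : List (Int × Int) := [(-1, 0), (1, 0), (0, -1), (0, 1)]

def succsP (xlen ylen : Int) (board : List String) (p : Int × Int) : List (Int × Int) :=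
  dirs4.map (fun d => slideB xlen ylen board d.1 d.2 (xlen + ylen).toNat p.1 p.2)

def roundP (xlen ylen : Int) (board : List String)
    (F nxt : List (Int × Int)) (vis : PySem.Set (Int × Int)) :
    List (Int × Int) × PySem.Set (Int × Int) :=
  F.foldl (fun st p => expandP xlen ylen board p.1 p.2 dirs4 st.1 st.2) (nxt, vis)

def inR (xlen ylen : Int) (p : Int × Int) : Prop :=
  0 ≤ p.1 ∧ p.1 < xlen ∧ 0 ≤ p.2 ∧ p.2 < ylen

lemma pLoop_nil (xlen ylen : Int) (board : List String) (f : Nat) (depth : Int)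
    (vis : PySem.Set (Int × Int)) : pLoop xlen ylen board f [] [] depth vis = -1 := by
  cases f <;> rfl

lemma pLoop_shift (xlen ylen : Int) (board : List String) (f : Nat)
    (nxt : List (Int × Int)) (depth : Int) (vis : PySem.Set (Int × Int)) :
    pLoop xlen ylen board f [] nxt depth vis = pLoop xlen ylen board f nxt [] (depth + 1) vis := by
  cases f with
  | zero => rfl
  | succ f => cases nxt with
    | nil => rfl
    | cons p rest => obtain ⟨x, y⟩ := p; rfl

-- one whole round of the per-pop loop, given enough fuel for its pops
lemma pLoop_round (xlen ylen : Int) (board : List String) :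
    ∀ (F : List (Int × Int)) (f : Nat) (nxt : List (Int × Int)) (depth : Int)
      (vis : PySem.Set (Int × Int)), F.length ≤ f →
      pLoop xlen ylen board f F nxt depth vis =
        if F.any (fun p => decide (cellB board p.1 p.2 = 'G')) then depth
        else pLoop xlen ylen board (f - F.length) []
          (roundP xlen ylen board F nxt vis).1 depth (roundP xlen ylen board F nxt vis).2 := by
  intro F
  induction F with
  | nil => intro f nxt depth vis _; simp [roundP]
  | cons p rest ih =>
    intro f nxt depth vis hf
    obtain ⟨x, y⟩ := p
    cases f with
    | zero => simp at hf
    | succ f =>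
      simp only [pLoop, List.any_cons, roundP, List.foldl_cons]
      by_cases hg : cellB board x y = 'G'
      · simp [hg]
      · rw [if_neg hg]
        have h2 := ih f (expandP xlen ylen board x y [(-1, 0), (1, 0), (0, -1), (0, 1)] nxt vis).1
          depth (expandP xlen ylen board x y [(-1, 0), (1, 0), (0, -1), (0, 1)] nxt vis).2
          (by simpa using Nat.lt_succ_iff.mp (Nat.lt_of_lt_of_le (Nat.lt_succ_of_le le_rfl) hf))
        simp only [hg, decide_false, Bool.false_or] at h2 ⊢
        rw [h2]
        have : (expandP xlen ylen board x y [(-1, 0), (1, 0), (0, -1), (0, 1)] nxt vis) =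
            expandP xlen ylen board x y dirs4 nxt vis := rfl
        simp only [this, List.length_cons, Nat.succ_sub_succ]
        rfl

-- characterisation of expandP's accumulators
lemma expandP_char (xlen ylen : Int) (board : List String) (x y : Int) :
    ∀ (ds : List (Int × Int)) (V0 nxt : List (Int × Int)),
      (expandP xlen ylen board x y ds nxt (V0 ++ nxt)).2 =
          V0 ++ (expandP xlen ylen board x y ds nxt (V0 ++ nxt)).1 ∧
      (∀ q, q ∈ (expandP xlen ylen board x y ds nxt (V0 ++ nxt)).1 ↔
          q ∈ nxt ∨ (q ∉ V0 ++ nxt ∧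
            ∃ d ∈ ds, q = slideB xlen ylen board d.1 d.2 (xlen + ylen).toNat x y)) ∧
      ((V0 ++ nxt).Nodup → (V0 ++ (expandP xlen ylen board x y ds nxt (V0 ++ nxt)).1).Nodup) := by
  intro ds
  induction ds with
  | nil =>
    intro V0 nxt
    refine ⟨rfl, fun q => by simp [expandP], fun h => h⟩
  | cons d ds ih =>
    intro V0 nxt
    simp only [expandP]
    by_cases hp : slideB xlen ylen board d.1 d.2 (xlen + ylen).toNat x y ∈ V0 ++ nxt
    · rw [if_pos (by simpa [PySem.Set.contains_iff] using hp)]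
      obtain ⟨ha, hb, hc⟩ := ih V0 nxt
      refine ⟨ha, fun q => ?_, hc⟩
      rw [hb q]
      simp only [List.mem_cons]
      constructor
      · rintro (h | ⟨h1, d', hd', h2⟩)
        · exact Or.inl h
        · exact Or.inr ⟨h1, d', Or.inr hd', h2⟩
      · rintro (h | ⟨h1, d', hd' | hd', h2⟩)
        · exact Or.inl h
        · subst hd'; subst h2; exact absurd hp h1
        · exact Or.inr ⟨h1, d', hd', h2⟩
    · rw [if_neg (by simpa [PySem.Set.contains_iff] using hp)]
      rw [PySem.Set.add_of_not_mem hp]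
      have hassoc : (V0 ++ nxt) ++ [slideB xlen ylen board d.1 d.2 (xlen + ylen).toNat x y] =
          V0 ++ (nxt ++ [slideB xlen ylen board d.1 d.2 (xlen + ylen).toNat x y]) := by
        rw [List.append_assoc]
      rw [hassoc]
      obtain ⟨ha, hb, hc⟩ := ih V0 (nxt ++ [slideB xlen ylen board d.1 d.2 (xlen + ylen).toNat x y])
      have hp' : ¬(slideB xlen ylen board d.1 d.2 (xlen + ylen).toNat x y ∈ V0 ∨
          slideB xlen ylen board d.1 d.2 (xlen + ylen).toNat x y ∈ nxt) := by
        simpa [List.mem_append] using hp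
      refine ⟨ha, fun q => ?_, fun hnd => hc ?_⟩
      · rw [hb q]
        simp only [List.mem_append, List.mem_cons, List.not_mem_nil, or_false,
          or_and_right, exists_or, exists_eq_left]
        by_cases hq : q = slideB xlen ylen board d.1 d.2 (xlen + ylen).toNat x y
        · subst hq; tauto
        · tauto
      · rw [← hassoc]
        refine List.Nodup.append ?_ ?_ ?_
        · exact hnd
        · exact List.nodup_singleton _
        · intro a ha' hb'
          rw [List.mem_singleton] at hb'
          subst hb'
          exact hp ha'

-- characterisation of a whole round
lemma roundP_char (xlen ylen : Int) (board : List String) :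
    ∀ (F : List (Int × Int)) (V0 nxt : List (Int × Int)),
      (roundP xlen ylen board F nxt (V0 ++ nxt)).2 =
          V0 ++ (roundP xlen ylen board F nxt (V0 ++ nxt)).1 ∧
      (∀ q, q ∈ (roundP xlen ylen board F nxt (V0 ++ nxt)).1 ↔
          q ∈ nxt ∨ (q ∉ V0 ++ nxt ∧ ∃ p ∈ F, q ∈ succsP xlen ylen board p)) ∧
      ((V0 ++ nxt).Nodup → (V0 ++ (roundP xlen ylen board F nxt (V0 ++ nxt)).1).Nodup) := by
  intro F
  induction F with
  | nil =>
    intro V0 nxt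
    refine ⟨rfl, fun q => by simp [roundP], fun h => h⟩
  | cons p F ih =>
    intro V0 nxt
    obtain ⟨he2, heMem, heNd⟩ := expandP_char xlen ylen board p.1 p.2 dirs4 V0 nxt
    have hstep : roundP xlen ylen board (p :: F) nxt (V0 ++ nxt) =
        roundP xlen ylen board F
          (expandP xlen ylen board p.1 p.2 dirs4 nxt (V0 ++ nxt)).1
          (expandP xlen ylen board p.1 p.2 dirs4 nxt (V0 ++ nxt)).2 := rfl
    rw [hstep, he2]
    obtain ⟨ha, hb, hc⟩ := ih V0 (expandP xlen ylen board p.1 p.2 dirs4 nxt (V0 ++ nxt)).1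
    refine ⟨ha, fun q => ?_, fun h => hc (heNd h)⟩
    rw [hb q]
    have hsucc : ∀ r : Int × Int,
        (∃ d ∈ dirs4, r = slideB xlen ylen board d.1 d.2 (xlen + ylen).toNat p.1 p.2) ↔
          r ∈ succsP xlen ylen board p := fun r => by
      simp [succsP, List.mem_map, eq_comm]
    have hE : q ∈ (expandP xlen ylen board p.1 p.2 dirs4 nxt (V0 ++ nxt)).1 ↔
        q ∈ nxt ∨ (q ∉ V0 ++ nxt ∧ q ∈ succsP xlen ylen board p) :=
      (heMem q).trans (or_congr Iff.rfl (and_congr Iff.rfl (hsucc q)))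
    simp only [List.mem_append, List.mem_cons, or_and_right, exists_or, exists_eq_left] at hE ⊢
    tauto

lemma stepB_mem (xlen ylen : Int) (board : List String) (reach : PySem.Set (Int × Int)) (q : Int × Int) :
    q ∈ stepB xlen ylen board reach ↔ q ∈ reach ∨ ∃ p ∈ reach, q ∈ succsP xlen ylen board p := by
  have gen : ∀ (L : List (Int × Int)) (s : PySem.Set (Int × Int)),
      q ∈ L.foldl (fun s p =>
        PySem.Set.add (PySem.Set.add (PySem.Set.add (PySem.Set.add s
            (slideB xlen ylen board (-1) 0 (xlen + ylen).toNat p.1 p.2))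
            (slideB xlen ylen board 1 0 (xlen + ylen).toNat p.1 p.2))
            (slideB xlen ylen board 0 (-1) (xlen + ylen).toNat p.1 p.2))
            (slideB xlen ylen board 0 1 (xlen + ylen).toNat p.1 p.2)) s ↔
        q ∈ s ∨ ∃ p ∈ L, q ∈ succsP xlen ylen board p := by
    intro L
    induction L with
    | nil => intro s; simp
    | cons p L ih =>
      intro s
      rw [List.foldl_cons, ih]
      simp only [PySem.Set.mem_add, List.mem_cons]
      constructor
      · rintro (((((h | h) | h) | h) | h) | ⟨p', hp', h⟩)
        · exact Or.inl h
        · exact Or.inr ⟨p, Or.inl rfl, by simp [succsP, dirs4, h]⟩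
        · exact Or.inr ⟨p, Or.inl rfl, by simp [succsP, dirs4, h]⟩
        · exact Or.inr ⟨p, Or.inl rfl, by simp [succsP, dirs4, h]⟩
        · exact Or.inr ⟨p, Or.inl rfl, by simp [succsP, dirs4, h]⟩
        · exact Or.inr ⟨p', Or.inr hp', h⟩
      · rintro (h | ⟨p', hp' | hp', h⟩)
        · exact Or.inl (Or.inl (Or.inl (Or.inl (Or.inl h))))
        · subst hp'
          simp only [succsP, dirs4, List.map_cons, List.map_nil, List.mem_cons,
            List.not_mem_nil, or_false] at h
          rcases h with h | h | h | h <;> simp [h]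
        · exact Or.inr ⟨p', hp', h⟩
  exact gen reach reach

lemma stepB_nodup (xlen ylen : Int) (board : List String) (reach : PySem.Set (Int × Int))
    (h : reach.Nodup) : (stepB xlen ylen board reach).Nodup := by
  have gen : ∀ (L : List (Int × Int)) (s : PySem.Set (Int × Int)), s.Nodup →
      (L.foldl (fun s p =>
        PySem.Set.add (PySem.Set.add (PySem.Set.add (PySem.Set.add s
            (slideB xlen ylen board (-1) 0 (xlen + ylen).toNat p.1 p.2))
            (slideB xlen ylen board 1 0 (xlen + ylen).toNat p.1 p.2))
            (slideB xlen ylen board 0 (-1) (xlen + ylen).toNat p.1 p.2))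
            (slideB xlen ylen board 0 1 (xlen + ylen).toNat p.1 p.2)) s).Nodup := by
    intro L
    induction L with
    | nil => intro s hs; exact hs
    | cons p L ih =>
      intro s hs
      rw [List.foldl_cons]
      exact ih _ (PySem.Set.nodup_add _ _ (PySem.Set.nodup_add _ _ (PySem.Set.nodup_add _ _
        (PySem.Set.nodup_add _ _ hs))))
  exact gen reach reach h

lemma slide_inR (xlen ylen : Int) (board : List String) (dxi dyi : Int) :
    ∀ (f : Nat) (nx ny : Int), inR xlen ylen (nx, ny) →
      inR xlen ylen (slideB xlen ylen board dxi dyi f nx ny) := by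
  intro f
  induction f with
  | zero => intro nx ny h; exact h
  | succ f ih =>
    intro nx ny h
    simp only [slideB]
    split
    · rename_i hcond
      exact ih _ _ ⟨hcond.1, hcond.2.1, hcond.2.2.1, hcond.2.2.2.1⟩
    · exact h

lemma visited_card (xlen ylen : Int) (vis : List (Int × Int)) (hn : vis.Nodup)
    (hr : ∀ p ∈ vis, inR xlen ylen p) : vis.length ≤ xlen.toNat * ylen.toNat := by
  calc vis.length = vis.toFinset.card := (List.toFinset_card_of_nodup hn).symm
    _ ≤ ((Finset.Ico (0 : Int) xlen) ×ˢ (Finset.Ico (0 : Int) ylen)).card := by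
        apply Finset.card_le_card
        intro p hp
        have h := hr p (List.mem_toFinset.mp hp)
        simp only [Finset.mem_product, Finset.mem_Ico]
        exact ⟨⟨h.1, h.2.1⟩, ⟨h.2.2.1, h.2.2.2⟩⟩
    _ = xlen.toNat * ylen.toNat := by
        rw [Finset.card_product, Int.card_Ico, Int.card_Ico]
        simp

-- the main simulation: per-pop level BFS over (frontier F, visited vis) against the
-- whole-set fixed-point loop over reach, with matching member sets
lemma main_sim (xlen ylen : Int) (board : List String) :
    ∀ (k f : Nat) (F : List (Int × Int)) (vis reach : PySem.Set (Int × Int)) (depth : Int),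
      (∀ p, p ∈ vis ↔ p ∈ reach) →
      (∀ p ∈ F, p ∈ vis) →
      (∀ p ∈ vis, p ∉ F → cellB board p.1 p.2 ≠ 'G') →
      (∀ p ∈ vis, p ∉ F → ∀ q ∈ succsP xlen ylen board p, q ∈ vis) →
      vis.Nodup →
      reach.Nodup →
      (∀ p ∈ vis, inR xlen ylen p) →
      F.length + xlen.toNat * ylen.toNat ≤ f + vis.length →
      (F ≠ [] → xlen.toNat * ylen.toNat + 1 ≤ vis.length + k) →
      pLoop xlen ylen board f F [] depth vis = bLoop xlen ylen board k depth reach := by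
  intro k
  induction k with
  | zero =>
    intro f F vis reach depth h1 h2 h3 h4 h5 h7 h6 hf hk
    have hcard := visited_card xlen ylen vis h5 h6
    cases F with
    | nil => rw [pLoop_nil]; rfl
    | cons p F' => exact absurd (hk (by simp)) (by omega)
  | succ k ih =>
    intro f F vis reach depth h1 h2 h3 h4 h5 h7 h6 hf hk
    have hcard := visited_card xlen ylen vis h5 h6
    have hflen : F.length ≤ f := by omega
    rw [pLoop_round xlen ylen board F f [] depth vis hflen]
    have hrc := roundP_char xlen ylen board F vis []
    rw [List.append_nil] at hrc
    obtain ⟨hc6, hc2, hc3⟩ := hrc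
    simp only [List.not_mem_nil, false_or] at hc2
    simp only [bLoop]
    have hany : reach.any (fun p => decide (cellB board p.1 p.2 = 'G')) =
        F.any (fun p => decide (cellB board p.1 p.2 = 'G')) := by
      cases hFA : F.any (fun p => decide (cellB board p.1 p.2 = 'G')) with
      | false =>
        rw [List.any_eq_false] at hFA
        rw [List.any_eq_false]
        intro p hp
        by_cases hpF : p ∈ F
        · exact hFA p hpF
        · simpa using h3 p ((h1 p).mpr hp) hpF
      | true =>
        rw [List.any_eq_true] at hFA
        rw [List.any_eq_true]
        obtain ⟨p, hp, hg⟩ := hFA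
        exact ⟨p, (h1 p).mp (h2 p hp), hg⟩
    rw [hany]
    cases hFA : F.any (fun p => decide (cellB board p.1 p.2 = 'G')) with
    | true => simp
    | false =>
      simp only [Bool.false_eq_true, if_false]
      have hnoG : ∀ p ∈ F, ¬ cellB board p.1 p.2 = 'G' := by
        rw [List.any_eq_false] at hFA
        intro p hp
        simpa using hFA p hp
      rw [pLoop_shift]
      have hmem2 : ∀ q, q ∈ (roundP xlen ylen board F [] vis).2 ↔
          q ∈ vis ∨ q ∈ (roundP xlen ylen board F [] vis).1 := by
        intro q; rw [hc6]; exact List.mem_append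
      have hsuccR : ∀ p ∈ vis, p ∉ F →
          ∀ q ∈ succsP xlen ylen board p, q ∈ (roundP xlen ylen board F [] vis).2 := by
        intro p hp hpF q hq
        exact (hmem2 q).mpr (Or.inl (h4 p hp hpF q hq))
      have h1' : ∀ q, q ∈ (roundP xlen ylen board F [] vis).2 ↔ q ∈ stepB xlen ylen board reach := by
        intro q
        rw [stepB_mem, hmem2]
        constructor
        · rintro (h | h)
          · exact Or.inl ((h1 q).mp h)
          · obtain ⟨_, p, hp, hq⟩ := (hc2 q).mp h
            exact Or.inr ⟨p, (h1 p).mp (h2 p hp), hq⟩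
        · rintro (h | ⟨p, hp, hq⟩)
          · exact Or.inl ((h1 q).mpr h)
          · have hpv : p ∈ vis := (h1 p).mpr hp
            by_cases hpF : p ∈ F
            · by_cases hqv : q ∈ vis
              · exact Or.inl hqv
              · exact Or.inr ((hc2 q).mpr ⟨hqv, p, hpF, hq⟩)
            · exact Or.inl (h4 p hpv hpF q hq)
      have h2' : ∀ q ∈ (roundP xlen ylen board F [] vis).1,
          q ∈ (roundP xlen ylen board F [] vis).2 := by
        intro q hq; exact (hmem2 q).mpr (Or.inr hq)
      have hvisOf2 : ∀ p ∈ (roundP xlen ylen board F [] vis).2,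
          p ∉ (roundP xlen ylen board F [] vis).1 → p ∈ vis := by
        intro p hp hnp
        rcases (hmem2 p).mp hp with h | h
        · exact h
        · exact absurd h hnp
      have h3' : ∀ p ∈ (roundP xlen ylen board F [] vis).2,
          p ∉ (roundP xlen ylen board F [] vis).1 → cellB board p.1 p.2 ≠ 'G' := by
        intro p hp hnp
        have hpv := hvisOf2 p hp hnp
        by_cases hpF : p ∈ F
        · exact hnoG p hpF
        · exact h3 p hpv hpF
      have h4' : ∀ p ∈ (roundP xlen ylen board F [] vis).2,
          p ∉ (roundP xlen ylen board F [] vis).1 →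
          ∀ q ∈ succsP xlen ylen board p, q ∈ (roundP xlen ylen board F [] vis).2 := by
        intro p hp hnp q hq
        have hpv := hvisOf2 p hp hnp
        by_cases hpF : p ∈ F
        · by_cases hqv : q ∈ vis
          · exact (hmem2 q).mpr (Or.inl hqv)
          · exact (hmem2 q).mpr (Or.inr ((hc2 q).mpr ⟨hqv, p, hpF, hq⟩))
        · exact hsuccR p hpv hpF q hq
      have h5' : (roundP xlen ylen board F [] vis).2.Nodup := by
        rw [hc6]; exact hc3 h5
      have h6' : ∀ p ∈ (roundP xlen ylen board F [] vis).2, inR xlen ylen p := by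
        intro p hp
        rcases (hmem2 p).mp hp with h | h
        · exact h6 p h
        · obtain ⟨_, p', hp', hq⟩ := (hc2 p).mp h
          simp only [succsP, dirs4, List.mem_map] at hq
          obtain ⟨d, _, hd⟩ := hq
          rw [← hd]
          exact slide_inR xlen ylen board d.1 d.2 _ p'.1 p'.2 (h6 p' (h2 p' hp'))
      have hlen : (roundP xlen ylen board F [] vis).2.length =
          vis.length + (roundP xlen ylen board F [] vis).1.length := by
        rw [hc6, List.length_append]
      have hne : (roundP xlen ylen board F [] vis).1 ≠ [] → F ≠ [] := by
        intro h
        obtain ⟨q, hq⟩ := List.exists_mem_of_ne_nil _ h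
        obtain ⟨_, p, hp, _⟩ := (hc2 q).mp hq
        exact List.ne_nil_of_mem hp
      have hf' : (roundP xlen ylen board F [] vis).1.length + xlen.toNat * ylen.toNat ≤
          (f - F.length) + (roundP xlen ylen board F [] vis).2.length := by omega
      have hk' : (roundP xlen ylen board F [] vis).1 ≠ [] →
          xlen.toNat * ylen.toNat + 1 ≤ (roundP xlen ylen board F [] vis).2.length + k := by
        intro h
        have hF := hne h
        have := hk hF
        have hpos : 0 < (roundP xlen ylen board F [] vis).1.length := List.length_pos_iff.mpr h
        omega
      have hreachlen : reach.length = vis.length :=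
        ((List.perm_ext_iff_of_nodup h7 h5).mpr (fun a => (h1 a).symm)).length_eq
      have hstepnd : (stepB xlen ylen board reach).Nodup := stepB_nodup xlen ylen board reach h7
      have hsteplen : (stepB xlen ylen board reach).length =
          (roundP xlen ylen board F [] vis).2.length :=
        ((List.perm_ext_iff_of_nodup hstepnd h5').mpr (fun a => (h1' a).symm)).length_eq
      show pLoop xlen ylen board (f - F.length) (roundP xlen ylen board F [] vis).1 []
          (depth + 1) (roundP xlen ylen board F [] vis).2 =
        if (stepB xlen ylen board reach).length = reach.length then -1
        else bLoop xlen ylen board k (depth + 1) (stepB xlen ylen board reach)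
      by_cases hnil : (roundP xlen ylen board F [] vis).1 = []
      · rw [if_pos (by rw [hsteplen, hreachlen, hlen, hnil]; simp)]
        rw [hnil, pLoop_nil]
      · have hpos : 0 < (roundP xlen ylen board F [] vis).1.length :=
          List.length_pos_iff.mpr hnil
        rw [if_neg (by omega)]
        exact ih (f - F.length) (roundP xlen ylen board F [] vis).1
          (roundP xlen ylen board F [] vis).2 (stepB xlen ylen board reach) (depth + 1)
          h1' h2' h3' h4' h5' hstepnd h6' hf' hk'

lemma start_inR (board : List String) (h1 : board ≠ []) (h2 : 1 ≤ (board.headD "").length) :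
    inR (board.length : Int) ((board.headD "").length : Int)
      ((List.range board.length).foldl (fun r i =>
        (List.range (board.headD "").length).foldl (fun r j =>
          if (board.getD i "").toList.getD j ' ' = 'R' then ((i : Int), (j : Int)) else r) r)
        ((0 : Int), (0 : Int))) := by
  have pres : ∀ {α β : Type} (P : β → Prop) (L : List α) (f : β → α → β)
      (hstep : ∀ x ∈ L, ∀ r, P r → P (f r x)) (r : β), P r → P (L.foldl f r) := by
    intro α β P L
    induction L with
    | nil => intro f _ r h; exact h
    | cons a L ih =>
      intro f hstep r h
      exact ih f (fun x hx r hr => hstep x (List.mem_cons_of_mem _ hx) r hr) _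
        (hstep a (List.mem_cons_self ..) r h)
  refine pres (inR (board.length : Int) ((board.headD "").length : Int)) _ _ ?_ _ ?_
  · intro i hi r hr
    refine pres (inR (board.length : Int) ((board.headD "").length : Int)) _ _ ?_ _ hr
    intro j hj r' hr'
    split
    · refine ⟨by positivity, ?_, by positivity, ?_⟩
      · show (i : Int) < (board.length : Int)
        exact_mod_cast List.mem_range.mp hi
      · show (j : Int) < ((board.headD "").length : Int)
        exact_mod_cast List.mem_range.mp hj
    · exact hr'
  · refine ⟨le_refl 0, ?_, le_refl 0, ?_⟩
    · show (0 : Int) < (board.length : Int)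
      exact_mod_cast List.length_pos_iff.mpr h1
    · show (0 : Int) < ((board.headD "").length : Int)
      exact_mod_cast h2

-- ===== VERDICT (by name: the statement is the Claim_ definition above) =====
theorem solution_spec : Claim_equal_solution := by
  intro board _ hpre
  obtain ⟨hb, hm, _⟩ := hpre
  show solution board = solution_alt board
  simp only [solution, solution_alt]
  generalize hs : (List.range board.length).foldl (fun r i =>
      (List.range (board.headD "").length).foldl (fun r j =>
        if (board.getD i "").toList.getD j ' ' = 'R' then ((i : Int), (j : Int)) else r) r)
      ((0 : Int), (0 : Int)) = s
  have hsr : inR (board.length : Int) ((board.headD "").length : Int) s := by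
    rw [← hs]; exact start_inR board hb hm
  have hadd : PySem.Set.add (PySem.Set.empty : PySem.Set (Int × Int)) s = [s] := rfl
  rw [hadd]
  have h1 := loop_eq (board.length : Int) ((board.headD "").length : Int) board
      (board.length * (board.headD "").length + 1) [s] [] 0 [s]
  simp only [List.map_cons, List.map_nil, List.append_nil] at h1
  rw [h1]
  apply main_sim
  · intro p; exact Iff.rfl
  · intro p hp; simpa using hp
  · intro p hp hnp; simp at hp; exact absurd (by simp [hp]) hnp
  · intro p hp hnp; simp at hp; exact absurd (by simp [hp]) hnp
  · exact List.nodup_singleton s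
  · exact List.nodup_singleton s
  · intro p hp; simp at hp; subst hp; exact hsr
  · simp; omega
  · intro _; simp
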